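-- pv_equiv track=rewrite | github.com/loadsmart/dojo_load_ops | 2020-10-29 - python - banners/problem.py | banner_area
-- ===== SOURCE A (Python) =====
-- def banner_area(buildings):
--     results = []
--     # [(ind, b), ]
--     augment = list(enumerate(buildings))
--     augment.sort(reverse=True)
--     support = [(0, 0), ()]
--
--     for i in range(len(buildings)):
--         left = buildings[:i]
--         right = buildings[i:]
--         area_left = max(left) * len(left) if left else 0
--         area_right = max(right) * len(right) if right else 0
--         results.append(area_left + area_right)
--     return min(results)
-- ===== SOURCE B (Python) =====
-- def banner_area(buildings):
--     n = len(buildings)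
--     # suffix maxima: suf[i] = max(buildings[i:]), built in one right-to-left pass
--     suf = buildings[:]
--     for i in range(n - 2, -1, -1):
--         if suf[i + 1] > suf[i]:
--             suf[i] = suf[i + 1]
--     best = suf[0] * n          # split at i = 0: left part empty
--     pmax = buildings[0]        # running max of buildings[:i]
--     for i in range(1, n):
--         cand = pmax * i + suf[i] * (n - i)
--         if cand < best:
--             best = cand
--         if buildings[i] > pmax:
--             pmax = buildings[i]
--     return best
-- ===== Notes on version B (the rewrite author's own statement) =====
-- stated objective: faster
-- what changed: replaced the per-split slicing and re-scanning (max of left and right slice for every i) by a precomputed suffix-maximum array plus a running prefix maximum, giving one linear pass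
-- outside the precondition, e.g. on banner_area([]): A raises ValueError, B raises IndexError
import Mathlib
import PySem

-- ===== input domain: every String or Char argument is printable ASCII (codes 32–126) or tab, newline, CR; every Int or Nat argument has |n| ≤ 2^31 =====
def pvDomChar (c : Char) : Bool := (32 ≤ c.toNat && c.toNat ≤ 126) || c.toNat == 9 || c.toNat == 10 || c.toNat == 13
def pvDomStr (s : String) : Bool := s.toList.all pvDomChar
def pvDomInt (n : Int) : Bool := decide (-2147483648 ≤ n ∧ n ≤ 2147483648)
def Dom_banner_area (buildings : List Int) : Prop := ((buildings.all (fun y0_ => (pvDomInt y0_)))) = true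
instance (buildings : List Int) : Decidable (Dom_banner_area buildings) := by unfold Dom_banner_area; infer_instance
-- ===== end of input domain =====

-- B replaces A's per-split slice-and-rescan by a suffix-max array and a running prefix max (O(n^2) -> O(n)).
-- Both Pythons raise on the empty list (ValueError / IndexError), excluded by Pre_.

-- ===== PORT A =====
def banner_area (buildings : List Int) : Int :=
  -- dead code in A, ported for faithfulness: augment = sorted(enumerate(buildings), reverse=True)
  -- ('support = [(0, 0), ()]' is an unused heterogeneous literal, not representable; it affects nothing)
  let _augment := PySem.List.sorted2 (PySem.List.enumerate buildings 0)
      (fun p => p.1) (fun p => p.2) true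
  let results := (PySem.List.pyRange 0 (PySem.List.len buildings) 1).foldl
    (fun acc i =>
      let left := PySem.List.slice buildings none (some i)
      let right := PySem.List.slice buildings (some i) none
      let area_left := if left ≠ [] then (PySem.List.max? left (fun v => v)).getD 0 * (PySem.List.len left) else 0
      let area_right := if right ≠ [] then (PySem.List.max? right (fun v => v)).getD 0 * (PySem.List.len right) else 0
      acc ++ [area_left + area_right]) []
  -- min(results): raises ValueError on empty results (buildings = []), excluded by Pre_
  (PySem.List.min? results (fun v => v)).getD 0

-- ===== PORT B =====
-- B's right-to-left pass 'if suf[i+1] > suf[i]: suf[i] = suf[i+1]' as structural recursion on the list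
def sufMax : List Int → List Int
  | [] => []
  | [x] => [x]
  | x :: y :: t =>
    match sufMax (y :: t) with
    | [] => [x]                                -- unreachable: sufMax of a nonempty list is nonempty
    | m :: s => (if m > x then m else x) :: m :: s

-- B's forward loop: i, pmax, best; walks buildings[1:] alongside suf[1:]
def loopB (n : Int) : Int → Int → Int → List Int → List Int → Int
  | _, _, best, [], _ => best
  | _, _, best, _ :: _, [] => best             -- unreachable: suf has the same length
  | i, pmax, best, b :: bs, s :: ss =>
    loopB n (i + 1) (if b > pmax then b else pmax)
      (if pmax * i + s * (n - i) < best then pmax * i + s * (n - i) else best) bs ss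

def banner_area_alt (buildings : List Int) : Int :=
  match buildings with
  | [] => 0                                    -- Python raises IndexError here (outside Pre_)
  | b :: bs =>
    let n : Int := PySem.List.len (b :: bs)
    match sufMax (b :: bs) with
    | [] => 0                                  -- unreachable
    | s :: ss => loopB n 1 b (s * n) bs ss

-- ===== PRECONDITION & SPEC =====
-- A raises ValueError (min of empty list) on []; B raises IndexError there too.
def Pre_banner_area (buildings : List Int) : Prop := buildings ≠ []
instance (buildings : List Int) : Decidable (Pre_banner_area buildings) := by unfold Pre_banner_area; infer_instance
def pvWitness_banner_area : List Int := [3, 1, 2]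

def Spec_banner_area (buildings : List Int) (out : Int) : Prop := out = banner_area_alt buildings
instance (buildings : List Int) (out : Int) : Decidable (Spec_banner_area buildings out) := by unfold Spec_banner_area; infer_instance

-- ===== CLAIM (what is proved, stated in full; the proofs are below) =====
def Claim_equal_banner_area : Prop := ∀ (buildings : List Int), Dom_banner_area buildings → Pre_banner_area buildings → Spec_banner_area buildings (banner_area buildings)

-- ===== LEMMAS AND PROOFS =====

-- max of a nonempty list, as the running-max loop
def bmax : List Int → Int
  | [] => 0
  | x :: l => l.foldl max x

-- the split value A computes for cut position k
def Fval (full : List Int) (k : Nat) : Int :=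
  (if k = 0 then 0 else bmax (full.take k) * (k : Int)) +
  (if full.drop k = [] then 0 else bmax (full.drop k) * ((full.length : Int) - (k : Int)))

theorem foldl_max_shift (t : List Int) : ∀ a b : Int, t.foldl max (max a b) = max a (t.foldl max b) := by
  induction t with
  | nil => intro a b; rfl
  | cons y t ih =>
    intro a b
    simp only [List.foldl_cons]
    rw [max_assoc, ih]

theorem sufMax_cons : ∀ (l : List Int) (x : Int), sufMax (x :: l) = bmax (x :: l) :: sufMax l := by
  intro l
  induction l with
  | nil => intro x; simp [sufMax, bmax]
  | cons y t ih =>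
    intro x
    show (match sufMax (y :: t) with
      | [] => [x]
      | m :: s => (if m > x then m else x) :: m :: s) = _
    rw [ih y]
    show ((if bmax (y :: t) > x then bmax (y :: t) else x) :: bmax (y :: t) :: sufMax t)
        = bmax (x :: y :: t) :: bmax (y :: t) :: sufMax t
    have h1 : (if bmax (y :: t) > x then bmax (y :: t) else x) = bmax (x :: y :: t) := by
      simp only [bmax, List.foldl_cons]
      rw [foldl_max_shift t x y]
      split <;> omega
    rw [h1]

-- the list of candidate values B's forward loop considers
def cands (n : Int) : Int → Int → List Int → List Int
  | _, _, [] => []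
  | i, pmax, b :: bs => (pmax * i + bmax (b :: bs) * (n - i)) :: cands n (i + 1) (max pmax b) bs

theorem loopB_eq (n : Int) (t : List Int) : ∀ (i pmax best : Int),
    loopB n i pmax best t (sufMax t) = (cands n i pmax t).foldl min best := by
  induction t with
  | nil => intro i pmax best; rfl
  | cons b bs ih =>
    intro i pmax best
    rw [sufMax_cons]
    show loopB n (i + 1) (if b > pmax then b else pmax)
        (if pmax * i + bmax (b :: bs) * (n - i) < best then pmax * i + bmax (b :: bs) * (n - i) else best)
        bs (sufMax bs) = _
    rw [ih]
    have h1 : (if b > pmax then b else pmax) = max pmax b := by split <;> omega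
    have h2 : (if pmax * i + bmax (b :: bs) * (n - i) < best then pmax * i + bmax (b :: bs) * (n - i) else best)
        = min best (pmax * i + bmax (b :: bs) * (n - i)) := by split <;> omega
    rw [h1, h2, cands, List.foldl_cons]

theorem bmax_concat (x : Int) (t : List Int) (b : Int) :
    bmax ((x :: t) ++ [b]) = max (bmax (x :: t)) b := by
  simp [bmax, List.foldl_append]

theorem cands_eq (full : List Int) : ∀ (m k : Nat), 0 < k → full.length = k + m →
    cands (full.length : Int) (k : Int) (bmax (full.take k)) (full.drop k)
      = (List.range' k m).map (Fval full) := by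
  intro m
  induction m with
  | zero =>
    intro k hk hlen
    rw [List.drop_eq_nil_of_le (by omega)]
    rfl
  | succ m ih =>
    intro k hk hlen
    have hklt : k < full.length := by omega
    have hdrop : full.drop k = full[k] :: full.drop (k + 1) := List.drop_eq_getElem_cons hklt
    have hdne : full.drop k ≠ [] := by rw [hdrop]; exact List.cons_ne_nil _ _
    have htake1 : full.take (k + 1) = full.take k ++ [full[k]] := by
      rw [List.take_add_one]
      simp [List.getElem?_eq_getElem hklt]
    have htkne : full.take k ≠ [] := by
      have hl : (full.take k).length = k := by simp [List.length_take]; omega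
      intro h
      rw [h] at hl
      simp at hl
      omega
    obtain ⟨x, t, hxt⟩ := List.exists_cons_of_ne_nil htkne
    have hpm : max (bmax (full.take k)) full[k] = bmax (full.take (k + 1)) := by
      rw [htake1, hxt, bmax_concat]
    rw [hdrop, cands, List.range'_succ, List.map_cons]
    congr 1
    · rw [← hdrop, Fval, if_neg (by omega : ¬ k = 0), if_neg hdne]
    · have hih := ih (k + 1) (by omega) (by omega)
      rw [hpm, show ((k : Int) + 1) = (((k + 1 : Nat)) : Int) by push_cast; ring]
      exact hih

-- A-side: the per-iteration body equals Fval
theorem body_eq_F (full : List Int) (k : Nat) (hk : k < full.length) :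
    (let left := PySem.List.slice full none (some (k : Int))
     let right := PySem.List.slice full (some (k : Int)) none
     let area_left := if left ≠ [] then (PySem.List.max? left (fun v => v)).getD 0 * (PySem.List.len left) else 0
     let area_right := if right ≠ [] then (PySem.List.max? right (fun v => v)).getD 0 * (PySem.List.len right) else 0
     area_left + area_right) = Fval full k := by
  simp only [PySem.List.slice_to_natCast, PySem.List.slice_from_natCast]
  have hdl : (full.drop k).length = full.length - k := by simp [List.length_drop]
  have hdne : full.drop k ≠ [] := by
    intro h
    rw [h] at hdl
    simp at hdl
    omega
  obtain ⟨y, s, hys⟩ := List.exists_cons_of_ne_nil hdne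
  rw [Fval]
  by_cases hk0 : k = 0
  · subst hk0
    simp only [List.take_zero, List.drop_zero] at *
    rw [hys]
    have hlen : (y :: s).length = full.length := by rw [← hys]
    simp only [ne_eq, reduceCtorEq, not_false_eq_true, if_true, if_false,
      PySem.List.max?_id_cons, Option.getD_some, PySem.List.len_eq, hlen]
    simp [bmax]
  · have htkne : full.take k ≠ [] := by
      have hl : (full.take k).length = k := by simp [List.length_take]; omega
      intro h
      rw [h] at hl
      simp at hl
      omega
    obtain ⟨x, t, hxt⟩ := List.exists_cons_of_ne_nil htkne
    have hlt : (x :: t).length = k := by rw [← hxt]; simp [List.length_take]; omega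
    have hld : (y :: s).length = full.length - k := by rw [← hys]; simp [List.length_drop]
    rw [hxt, hys]
    simp only [ne_eq, reduceCtorEq, not_false_eq_true, if_true, if_neg hk0,
      PySem.List.max?_id_cons, Option.getD_some, PySem.List.len_eq, hlt, hld]
    have hb1 : bmax (x :: t) = t.foldl max x := rfl
    have hb2 : bmax (y :: s) = s.foldl max y := rfl
    rw [hb1, hb2]
    congr 1
    congr 1
    omega

-- main equivalence
theorem banner_area_eq (full : List Int) (hne : full ≠ []) :
    banner_area full = banner_area_alt full := by
  obtain ⟨b, bs, rfl⟩ := List.exists_cons_of_ne_nil hne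
  -- A's results list is (List.range n).map (Fval full)
  have hA : banner_area (b :: bs)
      = (PySem.List.min? ((List.range (b :: bs).length).map (fun k => Fval (b :: bs) k)) (fun v => v)).getD 0 := by
    simp only [banner_area]
    congr 2
    rw [PySem.List.len_eq, PySem.List.pyRange_zero_natCast, List.foldl_map,
      PySem.List.foldl_append_singleton_eq_map]
    apply List.map_congr_left
    intro k hk
    rw [List.mem_range] at hk
    exact body_eq_F (b :: bs) k hk
  set n : Nat := (b :: bs).length with hn
  have hn1 : 0 < n := by simp [hn]
  have hrange : List.range n = 0 :: List.range' 1 (n - 1) := by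
    rw [List.range_eq_range', show n = (n - 1) + 1 by omega, List.range'_succ,
      show (n - 1) + 1 = n by omega]
  -- A = foldl min (Fval 0) over the positive cut positions
  have hAv : banner_area (b :: bs)
      = ((List.range' 1 (n - 1)).map (fun k => Fval (b :: bs) k)).foldl min (Fval (b :: bs) 0) := by
    rw [hA, hrange, List.map_cons, PySem.List.min?_id_cons, Option.getD_some]
  -- B unfolds to the same foldl
  have halt : banner_area_alt (b :: bs)
      = loopB ((n : Nat) : Int) 1 b (bmax (b :: bs) * ((n : Nat) : Int)) bs (sufMax bs) := by
    simp only [banner_area_alt, sufMax_cons, PySem.List.len_eq, hn]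
  have hc := cands_eq (b :: bs) (n - 1) 1 (by omega) (by omega)
  rw [show (b :: bs).take 1 = [b] from rfl, show (b :: bs).drop 1 = bs from rfl,
    show bmax [b] = b from rfl, Nat.cast_one, ← hn] at hc
  have hB : banner_area_alt (b :: bs)
      = ((List.range' 1 (n - 1)).map (fun k => Fval (b :: bs) k)).foldl min (Fval (b :: bs) 0) := by
    rw [halt, loopB_eq, hc]
    congr 1
    rw [Fval]
    simp [← hn]
  rw [hAv, hB]

-- ===== VERDICT (by name: the statement is the Claim_ definition above) =====
theorem banner_area_spec : Claim_equal_banner_area := by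
  intro buildings _ hpre
  unfold Spec_banner_area
  exact banner_area_eq buildings hpre
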